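-- pv_equiv track=rewrite | github.com/code-cp/leetcode | solutions/6298/main.py | makeStringsEqual
-- ===== SOURCE A (Python) =====
-- from collections import Counter
--
-- def makeStringsEqual(s: str, target: str) -> bool:
--     n = len(s)
--     cnt = Counter(s)
--     cnt0 = cnt["0"]
--     cnt1 = cnt["1"]
--     diff0 = 0
--     diff1 = 0
--     for i in range(n):
--         if s[i] == target[i]:
--             continue
--         if s[i] == "0":
--             diff0 += 1
--         else:
--             diff1 += 1
--     diff = min(diff0, diff1)
--     diff0 -= diff
--     diff1 -= diff
--
--     for i in range(diff0):
--         if cnt1 <= 0: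
--             return False
--         cnt0 -= 1
--         cnt1 += 1
--
--     for i in range(diff1):
--         if cnt1 <= 1:
--             return False
--         cnt0 += 1
--         cnt1 -= 1
--
--     return True
-- ===== SOURCE B (Python) =====
-- def makeStringsEqual(s: str, target: str) -> bool:
--     ones = s.count('1')
--     diff = sum(1 if a != '0' else -1 for a, b in zip(s, target) if a != b)
--     return diff == 0 or 0 < ones > diff
-- ===== Notes on version B (the rewrite author's own statement) =====
-- stated objective: simpler
-- what changed: Replaces A's Counter bookkeeping, indexed diff-tally loop, min-subtraction and two step-by-step simulation loops with early returns by one signed-sum comprehension over zip(s, target) and a closed-form arithmetic test on that sum and the count of '1's.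
import Mathlib
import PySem

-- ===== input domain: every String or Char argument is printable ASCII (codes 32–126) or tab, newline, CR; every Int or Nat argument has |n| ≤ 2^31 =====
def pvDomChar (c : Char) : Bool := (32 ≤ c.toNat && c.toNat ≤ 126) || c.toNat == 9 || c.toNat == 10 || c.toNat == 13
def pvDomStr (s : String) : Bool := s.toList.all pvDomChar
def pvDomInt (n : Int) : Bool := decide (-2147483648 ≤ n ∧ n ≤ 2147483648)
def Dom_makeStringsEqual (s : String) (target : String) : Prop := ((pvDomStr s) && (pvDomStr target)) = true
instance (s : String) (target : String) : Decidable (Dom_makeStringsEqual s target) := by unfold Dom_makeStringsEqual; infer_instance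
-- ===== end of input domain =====

-- B replaces A's Counter bookkeeping, indexed diff tally, min-subtraction and two simulation
-- loops by one signed-sum pass over zip(s, target) and a closed-form test (objective: simpler).

-- ===== PORT A =====
-- 'for i in range(diff0): if cnt1 <= 0: return False; cnt0 -= 1; cnt1 += 1' (none = early 'return False')
def loopA1 : Nat → Int → Int → Option (Int × Int)
  | 0, c0, c1 => some (c0, c1)
  | k + 1, c0, c1 => if c1 ≤ 0 then none else loopA1 k (c0 - 1) (c1 + 1)

-- 'for i in range(diff1): if cnt1 <= 1: return False; cnt0 += 1; cnt1 -= 1; return True'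
def loopA2 : Nat → Int → Int → Bool
  | 0, _, _ => true
  | k + 1, c0, c1 => if c1 ≤ 1 then false else loopA2 k (c0 + 1) (c1 - 1)

-- the early 'return False' threaded out of the first loop: none = already returned False
def loopAfter (r : Option (Int × Int)) (k : Nat) : Bool :=
  match r with
  | none => false
  | some (c0, c1) => loopA2 k c0 c1

def makeStringsEqual (s : String) (target : String) : Bool :=
  let ls := s.toList
  let lt := target.toList
  let n : Int := PySem.List.len ls
  -- cnt = Counter(s); cnt0 = cnt["0"]; cnt1 = cnt["1"]
  let cnt0 : Int := (PySem.Dict.counter ls).getD '0' 0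
  let cnt1 : Int := (PySem.Dict.counter ls).getD '1' 0
  -- the diff-counting loop; pyGetD's default is unreachable under Pre_ (i < len s ≤ len target)
  let dp := (PySem.List.pyRange 0 n 1).foldl (fun (p : Int × Int) i =>
      if PySem.List.pyGetD ls i ' ' = PySem.List.pyGetD lt i ' ' then p
      else if PySem.List.pyGetD ls i ' ' = '0' then (p.1 + 1, p.2) else (p.1, p.2 + 1)) (0, 0)
  let diff := min dp.1 dp.2
  let diff0 := dp.1 - diff
  let diff1 := dp.2 - diff
  loopAfter (loopA1 diff0.toNat cnt0 cnt1) diff1.toNat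

-- ===== PORT B =====
def makeStringsEqual_alt (s : String) (target : String) : Bool :=
  -- ones = s.count('1')  (single-character substring count = character count)
  let ones : Int := ((s.toList.filter fun c => c == '1').length : Int)
  -- diff = sum(1 if a != '0' else -1 for a, b in zip(s, target) if a != b)
  let diff : Int :=
    (((s.toList.zip target.toList).filter fun p => !(p.1 == p.2)).map
      fun p => if p.1 != '0' then (1 : Int) else -1).sum
  decide (diff = 0) || (decide (0 < ones) && decide (diff < ones))

-- ===== PRECONDITION & SPEC =====
-- Pre_ excludes exactly the inputs on which A raises IndexError: the diff loop reads
-- target[i] for every i < len(s), so A returns iff len(s) ≤ len(target).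
def Pre_makeStringsEqual (s : String) (target : String) : Prop :=
  s.toList.length ≤ target.toList.length
instance (s : String) (target : String) : Decidable (Pre_makeStringsEqual s target) := by
  unfold Pre_makeStringsEqual; infer_instance

def pvWitness_makeStringsEqual : String × String := ("10", "010")

def Spec_makeStringsEqual (s : String) (target : String) (out : Bool) : Prop := out = makeStringsEqual_alt s target
instance (s : String) (target : String) (out : Bool) : Decidable (Spec_makeStringsEqual s target out) := by unfold Spec_makeStringsEqual; infer_instance

-- ===== CLAIM (what is proved, stated in full; the proofs are below) =====
def Claim_equal_makeStringsEqual : Prop := ∀ (s : String) (target : String), Dom_makeStringsEqual s target → Pre_makeStringsEqual s target → Spec_makeStringsEqual s target (makeStringsEqual s target)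

-- ===== LEMMAS AND PROOFS =====

-- number of positions i with s[i] ≠ target[i] and s[i] = '0' (A's diff0), zip-structured
def D0 : List Char → List Char → Int
  | a :: as, b :: bs => (if a = b then 0 else if a = '0' then 1 else 0) + D0 as bs
  | _, _ => 0

-- A's diff1 likewise
def D1 : List Char → List Char → Int
  | a :: as, b :: bs => (if a = b then 0 else if a = '0' then 0 else 1) + D1 as bs
  | _, _ => 0

lemma D0_nonneg (ls lt : List Char) : 0 ≤ D0 ls lt := by
  induction ls generalizing lt with
  | nil => simp [D0]
  | cons a as ih =>
    cases lt with
    | nil => simp [D0]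
    | cons b bs => simp only [D0]; have := ih bs; split_ifs <;> omega

lemma D1_nonneg (ls lt : List Char) : 0 ≤ D1 ls lt := by
  induction ls generalizing lt with
  | nil => simp [D1]
  | cons a as ih =>
    cases lt with
    | nil => simp [D1]
    | cons b bs => simp only [D1]; have := ih bs; split_ifs <;> omega

-- A's indexed diff-counting loop computes (D0, D1)
lemma fold_eq (ls lt : List Char) (acc : Int × Int) (hlen : ls.length ≤ lt.length) :
    (List.range ls.length).foldl (fun (p : Int × Int) k =>
      if ls.getD k ' ' = lt.getD k ' ' then p
      else if ls.getD k ' ' = '0' then (p.1 + 1, p.2) else (p.1, p.2 + 1)) acc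
    = (acc.1 + D0 ls lt, acc.2 + D1 ls lt) := by
  induction ls generalizing lt acc with
  | nil => simp [D0, D1]
  | cons a as ih =>
    cases lt with
    | nil => simp at hlen
    | cons b bs =>
      simp only [List.length_cons]
      rw [List.range_succ_eq_map]
      simp only [List.foldl_cons, List.foldl_map, List.getD_cons_succ, List.getD_cons_zero]
      rw [ih bs _ (by simpa using hlen)]
      simp only [D0, D1]
      split_ifs <;> simp <;> ring_nf

lemma loopA1_eq (k : Nat) (c0 c1 : Int) :
    loopA1 k c0 c1 = if 0 < k ∧ c1 ≤ 0 then none else some (c0 - k, c1 + k) := by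
  induction k generalizing c0 c1 with
  | zero => simp [loopA1]
  | succ k ih =>
    simp only [loopA1, ih]
    by_cases h1 : c1 ≤ 0
    · have h2 : 0 < k + 1 ∧ c1 ≤ 0 := ⟨Nat.succ_pos k, h1⟩
      simp [h1, h2]
    · have h3 : ¬ (0 < k ∧ c1 + 1 ≤ 0) := by omega
      have h4 : ¬ (0 < k + 1 ∧ c1 ≤ 0) := by simp [h1]
      simp only [if_neg h1, if_neg h3, if_neg h4, Option.some.injEq, Prod.mk.injEq]
      push_cast
      constructor <;> ring

lemma loopA2_eq (k : Nat) (c0 c1 : Int) :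
    loopA2 k c0 c1 = decide (k = 0 ∨ (k : Int) < c1) := by
  induction k generalizing c0 c1 with
  | zero => simp [loopA2]
  | succ k ih =>
    simp only [loopA2, ih]
    split_ifs with h1
    · symm; simp; omega
    · by_cases h : (k : Int) < c1 - 1
      · have : ((k : Int) + 1) < c1 := by omega
        simp_all
      · by_cases hk : k = 0
        · subst hk; simp; omega
        · simp [hk]; constructor <;> intro <;> omega

-- B's signed sum over the filtered zip is D1 - D0
lemma B_sum (ls lt : List Char) :
    (((ls.zip lt).filter fun p => !(p.1 == p.2)).map
      fun p => if p.1 != '0' then (1 : Int) else -1).sum = D1 ls lt - D0 ls lt := by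
  induction ls generalizing lt with
  | nil => simp [D0, D1]
  | cons a as ih =>
    cases lt with
    | nil => simp [D0, D1]
    | cons b bs =>
      simp only [List.zip_cons_cons, List.filter_cons]
      have hih := ih bs
      by_cases hab : a = b
      · subst hab
        have hne : (!(a == a)) = false := by simp
        simpa [hne, D0, D1] using hih
      · have hne : (!(a == b)) = true := by simp [hab]
        simp only [hne, if_pos, List.map_cons, List.sum_cons, hih, D0, D1]
        by_cases h0 : a = '0'
        · have hb : ¬ (('0' : Char) = b) := h0 ▸ hab
          simp [h0, hb]
          ring
        · simp [h0, hab]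
          ring

-- B's 'ones' is the Counter's count of '1'
lemma ones_eq (ls : List Char) :
    ((ls.filter fun c => c == '1').length : Int) = (ls.count '1' : Int) := by
  rw [List.count_eq_countP, List.countP_eq_length_filter]

-- merge B's Bool combination into one decide
lemma or_and_decide (p q r : Prop) [Decidable p] [Decidable q] [Decidable r] :
    (decide p || (decide q && decide r)) = decide (p ∨ (q ∧ r)) := by
  by_cases hp : p <;> by_cases hq : q <;> by_cases hr : r <;> simp [hp, hq, hr]

-- ===== VERDICT (by name: the statement is the Claim_ definition above) =====
theorem makeStringsEqual_spec : Claim_equal_makeStringsEqual := by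
  intro s target _ hPre
  unfold Spec_makeStringsEqual makeStringsEqual makeStringsEqual_alt
  simp only [PySem.List.len_eq, PySem.Dict.getD_counter, PySem.List.pyRange_one,
    List.foldl_map, sub_zero, Int.toNat_natCast, zero_add, PySem.List.pyGetD_natCast]
  rw [fold_eq _ _ _ hPre, B_sum, ones_eq]
  simp only [zero_add]
  rw [loopA1_eq]
  have h0 := D0_nonneg s.toList target.toList
  have h1 := D1_nonneg s.toList target.toList
  set c1 := (s.toList.count '1' : Int) with hc1
  have hc1nn : 0 ≤ c1 := by rw [hc1]; positivity
  set d0 := D0 s.toList target.toList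
  set d1 := D1 s.toList target.toList
  rw [or_and_decide]
  split_ifs with hfail
  · -- loop1 returned False
    simp only [loopAfter]
    rw [eq_comm, decide_eq_false_iff_not]
    omega
  · simp only [loopAfter]
    rw [loopA2_eq, decide_eq_decide]
    omega
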